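-- pv_equiv track=rewrite | github.com/aboutcode-org/container-inspector | src/conan/utils.py | find_shortest_prefix_length
-- ===== SOURCE A (Python) =====
-- def find_shortest_prefix_length(strings):
--     """
--     Given a list of strings (typically a list of image or layer ids), return the
--     smallest length that could be used to truncate these strings such that they still
--     would be uniquely identified by this truncated prefix. Used to shorten long hash-
--     like Layer Ids when analyzed together to make things more human friendly.
--     """
--     uniques = set(strings)
--     shortest_len = max(len(s) for s in uniques)
--     unique_count = len(uniques)
--     # iterate the range of possible length backwards
--     # start=shortest_len - 1, stop=0, step=-1
--     for length in range(shortest_len - 1, 0, -1):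
--         truncated = set(s[:length] for s in uniques)
--         if len(truncated) == unique_count:
--             shortest_len = length
--             continue
--         else:
--             break
--     return shortest_len
-- ===== SOURCE B (Python) =====
-- def find_shortest_prefix_length(strings):
--     uniq = sorted(set(strings))
--     maxlen = max(len(s) for s in uniq)
--     best = 0
--     for a, b in zip(uniq, uniq[1:]):
--         l = 0
--         for x, y in zip(a, b):
--             if x != y:
--                 break
--             l += 1
--         if l > best:
--             best = l
--     return min(best + 1, maxlen)
-- ===== Notes on version B (the rewrite author's own statement) =====
-- stated objective: alternative
-- what changed: Instead of scanning candidate lengths downward and re-truncating and re-deduplicating the whole set at every length, B sorts the distinct strings once and returns the maximum adjacent longest-common-prefix + 1, clamped by the maximum string length.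
import Mathlib
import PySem

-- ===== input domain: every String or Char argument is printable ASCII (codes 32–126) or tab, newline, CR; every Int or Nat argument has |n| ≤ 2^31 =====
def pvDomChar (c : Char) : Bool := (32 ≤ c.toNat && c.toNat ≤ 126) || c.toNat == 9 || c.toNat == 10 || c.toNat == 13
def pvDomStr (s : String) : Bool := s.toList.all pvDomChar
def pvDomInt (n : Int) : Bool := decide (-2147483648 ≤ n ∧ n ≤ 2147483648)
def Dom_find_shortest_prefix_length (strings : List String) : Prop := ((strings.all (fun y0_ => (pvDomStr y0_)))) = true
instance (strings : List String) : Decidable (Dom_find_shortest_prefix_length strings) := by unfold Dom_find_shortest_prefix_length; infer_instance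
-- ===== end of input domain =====

-- B sorts the distinct strings once and returns the maximum adjacent longest-common-prefix + 1
-- (clamped by the maximum length) instead of A's descending scan that re-truncates and
-- re-deduplicates the whole set at every candidate length (objective: alternative algorithm).

-- ===== PORT A =====
-- the for-loop over range(shortest_len - 1, 0, -1) with `continue`/`break`, carrying shortest_len
def pvLoopA (uniques : List String) (cnt : Int) : List Int → Int → Int
  | [], shortest => shortest
  | length :: rest, shortest =>
      let truncated : PySem.Set String :=
        PySem.Set.ofList (uniques.map (fun s => PySem.Str.slice s none (some length)))
      if PySem.Set.len truncated = cnt then pvLoopA uniques cnt rest length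
      else shortest

def find_shortest_prefix_length (strings : List String) : Int :=
  let uniques : PySem.Set String := PySem.Set.ofList strings
  -- max(len(s) for s in uniques) raises ValueError on empty input (excluded by Pre_); .getD 0 is unreachable under Pre_
  let shortest_len : Int :=
    (PySem.List.max? (uniques.map (fun s => PySem.Str.len s)) (fun x => x)).getD 0
  let unique_count : Int := PySem.Set.len uniques
  pvLoopA uniques unique_count (PySem.List.pyRange (shortest_len - 1) 0 (-1)) shortest_len

-- ===== PORT B =====
-- l = 0; for x, y in zip(a, b): if x != y: break; l += 1
def pvLcp : List Char → List Char → Nat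
  | x :: xs, y :: ys => if x = y then pvLcp xs ys + 1 else 0
  | _, _ => 0

def find_shortest_prefix_length_alt (strings : List String) : Int :=
  let uniq : List String := PySem.List.sorted (PySem.Set.ofList strings) (fun x => x)
  let maxlen : Int :=
    (PySem.List.max? (uniq.map (fun s => PySem.Str.len s)) (fun x => x)).getD 0
  let best : Int :=
    (uniq.zip (PySem.List.slice uniq (some 1) none)).foldl
      (fun best p =>
        if (pvLcp p.1.toList p.2.toList : Int) > best then (pvLcp p.1.toList p.2.toList : Int)
        else best) 0
  min (best + 1) maxlen

-- ===== PRECONDITION & SPEC =====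
-- Pre_ excludes only the empty list, on which A's max() raises ValueError (B's max() raises there too).
def Pre_find_shortest_prefix_length (strings : List String) : Prop := strings ≠ []
instance (strings : List String) : Decidable (Pre_find_shortest_prefix_length strings) := by
  unfold Pre_find_shortest_prefix_length; infer_instance
def pvWitness_find_shortest_prefix_length : List String := ["ab", "ac"]

def Spec_find_shortest_prefix_length (strings : List String) (out : Int) : Prop :=
  out = find_shortest_prefix_length_alt strings
instance (strings : List String) (out : Int) : Decidable (Spec_find_shortest_prefix_length strings out) := by
  unfold Spec_find_shortest_prefix_length; infer_instance

-- ===== CLAIM (what is proved, stated in full; the proofs are below) =====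
def Claim_equal_find_shortest_prefix_length : Prop :=
  ∀ (strings : List String), Dom_find_shortest_prefix_length strings →
    Pre_find_shortest_prefix_length strings →
    Spec_find_shortest_prefix_length strings (find_shortest_prefix_length strings)

-- ===== LEMMAS AND PROOFS =====

theorem pvLcp_comm : ∀ (a b : List Char), pvLcp a b = pvLcp b a
  | [], [] => rfl
  | [], _ :: _ => rfl
  | _ :: _, [] => rfl
  | x :: xs, y :: ys => by
      by_cases h : x = y
      · subst h; simp [pvLcp, pvLcp_comm xs ys]
      · have h' : ¬ y = x := fun e => h e.symm
        simp [pvLcp, h, h']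


theorem pvLcp_cons_eq (x : Char) (xs ys : List Char) :
    pvLcp (x :: xs) (x :: ys) = pvLcp xs ys + 1 := by simp [pvLcp]

theorem pvLcp_cons_ne {x y : Char} (h : x ≠ y) (xs ys : List Char) :
    pvLcp (x :: xs) (y :: ys) = 0 := by simp [pvLcp, h]

theorem pvLcp_lt_of_ne : ∀ (a b : List Char), a ≠ b → pvLcp a b < max a.length b.length
  | [], [], h => absurd rfl h
  | [], _ :: _, _ => by simp [pvLcp]
  | _ :: _, [], _ => by simp [pvLcp]
  | x :: xs, y :: ys, h => by
      by_cases e : x = y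
      · subst e
        have hne : xs ≠ ys := fun e2 => h (by rw [e2])
        have := pvLcp_lt_of_ne xs ys hne
        rw [pvLcp_cons_eq]
        simp only [List.length_cons]
        omega
      · rw [pvLcp_cons_ne e]
        simp only [List.length_cons]
        omega

theorem pvTake_eq_iff : ∀ (a b : List Char), a ≠ b → ∀ (L : Nat),
    (a.take L = b.take L ↔ L ≤ pvLcp a b)
  | [], [], h => absurd rfl h
  | [], y :: ys, _ => by intro L; cases L <;> simp [pvLcp]
  | x :: xs, [], _ => by intro L; cases L <;> simp [pvLcp]
  | x :: xs, y :: ys, h => by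
      intro L
      cases L with
      | zero => simp
      | succ L =>
        by_cases e : x = y
        · subst e
          have hne : xs ≠ ys := fun e2 => h (by rw [e2])
          rw [List.take_succ_cons, List.take_succ_cons, pvLcp_cons_eq]
          simp only [List.cons.injEq, true_and]
          rw [pvTake_eq_iff xs ys hne L]
          omega
        · rw [List.take_succ_cons, List.take_succ_cons, pvLcp_cons_ne e]
          constructor
          · intro hc
            injection hc with h1 _
            exact absurd h1 e
          · intro hc
            exact absurd hc (by omega)

theorem pvLcp_le_of_between : ∀ (a b c : List Char),
    List.Lex (· < ·) a b → List.Lex (· < ·) b c → pvLcp a c ≤ pvLcp b c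
  | [], _, c, _, _ => by simp [pvLcp]
  | _ :: _, b, [], _, hbc => by cases hbc
  | x :: as, b, z :: cs, hab, hbc => by
      cases b with
      | nil => cases hab
      | cons y bs =>
        cases hab with
        | cons hab' =>
          cases hbc with
          | cons hbc' =>
            rw [pvLcp_cons_eq, pvLcp_cons_eq]
            exact Nat.succ_le_succ (pvLcp_le_of_between as bs cs hab' hbc')
          | rel hr =>
            have hxz : x ≠ z := ne_of_lt hr
            rw [pvLcp_cons_ne hxz]
            exact Nat.zero_le _
        | rel hr =>
          cases hbc with
          | cons hbc' =>
            have hxz : x ≠ z := ne_of_lt hr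
            rw [pvLcp_cons_ne hxz]
            exact Nat.zero_le _
          | rel hr2 =>
            have hxz : x ≠ z := ne_of_lt (lt_trans hr hr2)
            rw [pvLcp_cons_ne hxz]
            exact Nat.zero_le _

-- Mathlib's String `<` is lexicographic on the character lists
theorem pvStr_lt_lex (s t : String) (h : s < t) :
    List.Lex (· < ·) s.toList t.toList :=
  String.lt_iff_toList_lt.mp h

-- ----- the fold in B computes a running maximum -----

theorem pvFold_le : ∀ (l : List (String × String)) (init : Int),
    init ≤ l.foldl (fun best p =>
      if (pvLcp p.1.toList p.2.toList : Int) > best then (pvLcp p.1.toList p.2.toList : Int)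
      else best) init
  | [], _ => le_refl _
  | p :: t, init => by
      refine le_trans ?_ (pvFold_le t _)
      show init ≤ if (pvLcp p.1.toList p.2.toList : Int) > init then (pvLcp p.1.toList p.2.toList : Int) else init
      split <;> omega

theorem pvFold_lt_iff : ∀ (l : List (String × String)) (init k : Int),
    (l.foldl (fun best p =>
      if (pvLcp p.1.toList p.2.toList : Int) > best then (pvLcp p.1.toList p.2.toList : Int)
      else best) init < k
     ↔ init < k ∧ ∀ p ∈ l, (pvLcp p.1.toList p.2.toList : Int) < k)
  | [], init, k => by simp
  | p :: t, init, k => by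
      rw [List.foldl_cons, pvFold_lt_iff t _ k]
      constructor
      · rintro ⟨h1, h2⟩
        have h1' : init < k ∧ (pvLcp p.1.toList p.2.toList : Int) < k := by
          split at h1 <;> omega
        exact ⟨h1'.1, fun q hq => by
          rcases List.mem_cons.mp hq with rfl | hq'
          · exact h1'.2
          · exact h2 q hq'⟩
      · rintro ⟨h1, h2⟩
        have hp := h2 p (List.mem_cons_self ..)
        refine ⟨by split <;> omega, fun q hq => h2 q (List.mem_cons_of_mem _ hq)⟩

-- ----- set-cardinality lemmas -----

theorem pvLen_ofList_lt {α : Type} [BEq α] [LawfulBEq α] :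
    ∀ (xs : List α), ¬ xs.Nodup → (PySem.Set.ofList xs).length < xs.length
  | [], h => absurd List.nodup_nil h
  | x :: xs, h => by
      rw [PySem.Set.ofList_cons, List.length_cons, List.length_cons]
      by_cases hx : x ∈ xs
      · have h2 := PySem.Set.length_ofList_le xs
        have h1 : ((PySem.Set.ofList xs).discard x).length < (PySem.Set.ofList xs).length := by
          have hmem : x ∈ PySem.Set.ofList xs := (PySem.Set.mem_ofList xs x).mpr hx
          simp only [PySem.Set.discard]
          exact List.length_filter_lt_length_iff_exists.mpr ⟨x, hmem, by simp⟩
        omega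
      · have hnx : ¬ xs.Nodup := fun hnd => h (List.nodup_cons.mpr ⟨hx, hnd⟩)
        have h1 := pvLen_ofList_lt xs hnx
        have h3 : ((PySem.Set.ofList xs).discard x).length ≤ (PySem.Set.ofList xs).length := by
          simp only [PySem.Set.discard]
          exact List.length_filter_le _ _
        omega

theorem pvLen_ofList_eq_iff {α : Type} [BEq α] [LawfulBEq α] (xs : List α) :
    ((PySem.Set.ofList xs).length = xs.length) ↔ xs.Nodup := by
  constructor
  · intro h
    by_contra hn
    exact absurd h (Nat.ne_of_lt (pvLen_ofList_lt xs hn))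
  · intro h
    rw [PySem.Set.ofList_eq_self_of_nodup xs h]

-- ----- pairwise over adjacent pairs -----

theorem pvPairwise_congr_ne {α : Type} {P Q : α → α → Prop} {l : List α}
    (hnd : l.Nodup) (h : ∀ a b, a ≠ b → (P a b ↔ Q a b)) :
    (l.Pairwise P ↔ l.Pairwise Q) := by
  constructor <;> intro hp
  · exact (List.Pairwise.and hnd hp).imp (fun hh => (h _ _ hh.1).mp hh.2)
  · exact (List.Pairwise.and hnd hp).imp (fun hh => (h _ _ hh.1).mpr hh.2)

theorem pvZip_tail_rel {R : String → String → Prop} :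
    ∀ (v : List String), v.Pairwise R → ∀ p ∈ v.zip v.tail, R p.1 p.2
  | [], _, p, hp => by simp at hp
  | [a], _, p, hp => by simp at hp
  | a :: b :: t, hv, p, hp => by
      rcases List.mem_cons.mp hp with rfl | hp'
      · exact (List.pairwise_cons.mp hv).1 b (List.mem_cons_self ..)
      · exact pvZip_tail_rel (b :: t) (List.pairwise_cons.mp hv).2 p hp'

theorem pvPairwise_iff_adjacent (k : Nat) :
    ∀ (v : List String), v.Pairwise (· < ·) →
      (v.Pairwise (fun a b => pvLcp a.toList b.toList < k)
       ↔ ∀ p ∈ v.zip v.tail, pvLcp p.1.toList p.2.toList < k)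
  | [], _ => by simp
  | [a], _ => by simp
  | a :: b :: t, hv => by
      have hv1 := List.pairwise_cons.mp hv
      have IH := pvPairwise_iff_adjacent k (b :: t) hv1.2
      have hv2 := List.pairwise_cons.mp hv1.2
      constructor
      · intro hp p hp'
        have h1 := List.pairwise_cons.mp hp
        rcases List.mem_cons.mp hp' with rfl | hmem
        · exact h1.1 b (List.mem_cons_self ..)
        · exact IH.mp h1.2 p hmem
      · intro h
        have htail : (b :: t).Pairwise (fun a b => pvLcp a.toList b.toList < k) :=
          IH.mpr (fun p hp => h p (List.mem_cons_of_mem _ hp))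
        refine List.pairwise_cons.mpr ⟨?_, htail⟩
        intro y hy
        rcases List.mem_cons.mp hy with rfl | hyt
        · exact h (a, y) (List.mem_cons_self ..)
        · have hby : pvLcp b.toList y.toList < k :=
            (List.pairwise_cons.mp htail).1 y hyt
          have hab : List.Lex (· < ·) a.toList b.toList :=
            pvStr_lt_lex a b (hv1.1 b (List.mem_cons_self ..))
          have hbyl : List.Lex (· < ·) b.toList y.toList :=
            pvStr_lt_lex b y (hv2.1 y hyt)
          exact lt_of_le_of_lt (pvLcp_le_of_between _ _ _ hab hbyl) hby

-- ----- max characterization -----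

theorem pvMax_eq_of_perm (xs ys : List Int) (h : xs.Perm ys) :
    (PySem.List.max? xs (fun x => x)).getD 0 = (PySem.List.max? ys (fun x => x)).getD 0 := by
  rcases hx : PySem.List.max? xs (fun x => x) with _ | mx <;>
    rcases hy : PySem.List.max? ys (fun x => x) with _ | my
  · rfl
  · exfalso
    have hxe : xs = [] := (PySem.List.max?_eq_none_iff xs _).mp hx
    subst hxe
    have hye : ys = [] := (h.symm).eq_nil
    subst hye
    rw [(PySem.List.max?_eq_none_iff ([] : List Int) (fun x => x)).mpr rfl] at hy
    cases hy
  · exfalso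
    have hye : ys = [] := (PySem.List.max?_eq_none_iff ys _).mp hy
    subst hye
    have hxe : xs = [] := h.eq_nil
    subst hxe
    rw [(PySem.List.max?_eq_none_iff ([] : List Int) (fun x => x)).mpr rfl] at hx
    cases hx
  · have h1 : mx ≤ my := PySem.List.max?_isMax hy mx (h.mem_iff.mp (PySem.List.max?_mem hx))
    have h2 : my ≤ mx := PySem.List.max?_isMax hx my (h.mem_iff.mpr (PySem.List.max?_mem hy))
    simp [le_antisymm h1 h2]

-- ----- truncation bridging -----

theorem pvSlice_ne_iff (a b : String) (hne : a ≠ b) (L : Int) (hL : 0 ≤ L) :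
    (PySem.Str.slice a none (some L) ≠ PySem.Str.slice b none (some L))
      ↔ pvLcp a.toList b.toList < L.toNat := by
  have hta : a.toList ≠ b.toList := fun e => hne (String.toList_inj.mp e)
  have h1 : PySem.Str.slice a none (some L) = PySem.Str.slice b none (some L)
      ↔ a.toList.take L.toNat = b.toList.take L.toNat := by
    rw [← String.toList_inj, PySem.Str.toList_slice, PySem.Str.toList_slice,
        PySem.Chars.slice_eq_listSlice, PySem.Chars.slice_eq_listSlice,
        PySem.List.slice_to a.toList hL, PySem.List.slice_to b.toList hL]
  rw [Ne, h1, pvTake_eq_iff a.toList b.toList hta L.toNat]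
  omega

-- ----- A's loop -----

theorem pvLoopA_eq (u : List String) (cnt : Int) (Mb : Int) (hMb : 0 ≤ Mb) :
    ∀ (n : Nat), Mb ≤ (n : Int) →
      (∀ L : Int, 1 ≤ L → L ≤ (n : Int) →
        ((PySem.Set.len (PySem.Set.ofList
            (u.map (fun s => PySem.Str.slice s none (some L)))) = cnt) ↔ Mb < L)) →
      pvLoopA u cnt (PySem.List.pyRange (n : Int) 0 (-1)) ((n : Int) + 1) = Mb + 1
  | 0, h0, _ => by
      rw [PySem.List.pyRange_neg_one_eq_nil (by simp)]
      simp only [pvLoopA]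
      omega
  | (n+1), hle, hiff => by
      rw [PySem.List.pyRange_neg_one_cons (by omega)]
      simp only [pvLoopA]
      by_cases hc : PySem.Set.len (PySem.Set.ofList
          (u.map (fun s => PySem.Str.slice s none (some (((n+1 : Nat)) : Int))))) = cnt
      · rw [if_pos hc]
        have hMlt : Mb < ((n+1 : Nat) : Int) :=
          (hiff ((n+1 : Nat) : Int) (by omega) (by omega)).mp hc
        have IH := pvLoopA_eq u cnt Mb hMb n (by omega)
          (fun L h1 h2 => hiff L h1 (by omega))
        have e1 : ((n+1 : Nat) : Int) - 1 = (n : Int) := by omega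
        have e2 : ((n+1 : Nat) : Int) = (n : Int) + 1 := by omega
        rw [e1, e2]
        exact IH
      · rw [if_neg hc]
        have h2 : ¬ (Mb < ((n+1 : Nat) : Int)) := fun hlt =>
          hc ((hiff ((n+1 : Nat) : Int) (by omega) (by omega)).mpr hlt)
        omega

-- ----- all-empty corner -----

theorem pvAllEmpty : ∀ (l : List String), l.Nodup → (∀ s ∈ l, s = "") → l ≠ [] → l = [""]
  | [], _, _, hne => absurd rfl hne
  | a :: t, hnd, hall, _ => by
      have ha : a = "" := hall a (List.mem_cons_self ..)
      subst ha
      cases t with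
      | nil => rfl
      | cons b t' =>
        have hb : b = "" := hall b (List.mem_cons_of_mem _ (List.mem_cons_self ..))
        have hnm : ("" : String) ∉ b :: t' := (List.nodup_cons.mp hnd).1
        rw [hb] at hnm
        exact absurd (List.mem_cons_self ..) hnm

-- ----- main equivalence -----

theorem pvMain (strings : List String) (hpre : strings ≠ []) :
    find_shortest_prefix_length strings = find_shortest_prefix_length_alt strings := by
  simp only [find_shortest_prefix_length, find_shortest_prefix_length_alt]
  rw [PySem.List.slice_from_one]
  set u : List String := PySem.Set.ofList strings with hu_def
  set v : List String := PySem.List.sorted u (fun x => x) with hv_def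
  set mA : Int := (PySem.List.max? (u.map fun s => PySem.Str.len s) fun x => x).getD 0 with hmA_def
  set mB : Int := (PySem.List.max? (v.map fun s => PySem.Str.len s) fun x => x).getD 0 with hmB_def
  set best : Int := (v.zip v.tail).foldl
      (fun best p =>
        if (pvLcp p.1.toList p.2.toList : Int) > best then (pvLcp p.1.toList p.2.toList : Int)
        else best) 0 with hbest_def
  have hune : u ≠ [] := by
    rw [hu_def]
    cases strings with
    | nil => exact absurd rfl hpre
    | cons a t =>
      intro hnil
      have ha : a ∈ PySem.Set.ofList (a :: t) :=
        (PySem.Set.mem_ofList _ _).mpr (List.mem_cons_self ..)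
      rw [hnil] at ha
      simp at ha
  have hnodup : u.Nodup := by rw [hu_def]; exact PySem.Set.nodup_ofList strings
  have hvperm : v.Perm u := by rw [hv_def]; exact PySem.List.sorted_perm u _ _
  have hvpw : v.Pairwise (· < ·) := by
    rw [hv_def, hu_def]; exact PySem.List.sorted_ofList_pairwise_lt strings
  have hmBA : mB = mA := by
    rw [hmA_def, hmB_def]
    exact pvMax_eq_of_perm _ _ (hvperm.map _)
  -- extract the value of the max
  rcases hmax : PySem.List.max? (u.map fun s => PySem.Str.len s) fun x => x with _ | mv
  · exfalso
    have := (PySem.List.max?_eq_none_iff _ _).mp hmax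
    exact hune (List.map_eq_nil_iff.mp this)
  · have hmAv : mA = mv := by rw [hmA_def, hmax]; rfl
    have hbound : ∀ s ∈ u, PySem.Str.len s ≤ mA := by
      intro s hs
      rw [hmAv]
      exact PySem.List.max?_isMax hmax _ (List.mem_map.mpr ⟨s, hs, rfl⟩)
    have hmA0 : 0 ≤ mA := by
      rcases List.mem_map.mp (PySem.List.max?_mem hmax) with ⟨s, _, he⟩
      have he' : PySem.Str.len s = mv := he
      have h0 : 0 ≤ PySem.Str.len s := by
        rw [PySem.Str.len_eq]; exact Int.natCast_nonneg _
      omega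
    rcases Int.lt_or_le mA 1 with hm1 | hm1
    · -- mA = 0 : the only distinct string is ""
      have hm0 : mA = 0 := by omega
      have hall : ∀ s ∈ u, s = "" := by
        intro s hs
        have h1 := hbound s hs
        rw [PySem.Str.len_eq, hm0] at h1
        have hlen : s.toList.length = 0 := by omega
        have htl : s.toList = [] := List.length_eq_zero_iff.mp hlen
        exact String.toList_inj.mp (by rw [htl]; rfl)
      have hu_eq : u = [""] := pvAllEmpty u hnodup hall hune
      have hv1 : v = [""] := by
        rw [hv_def, hu_eq]
        exact PySem.List.sorted_eq_self_of_pairwise _ _ (by simp)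
      have hbest00 : best = 0 := by rw [hbest_def, hv1]; rfl
      rw [hmBA, hm0, hbest00]
      rw [PySem.List.pyRange_neg_one_eq_nil (by norm_num)]
      simp only [pvLoopA]
      norm_num
    · -- 1 ≤ mA : the loop stops exactly at best + 1
      have hbest0 : 0 ≤ best := by rw [hbest_def]; exact pvFold_le _ 0
      have hbestlt : best < mA := by
        rw [hbest_def]
        refine (pvFold_lt_iff _ 0 mA).mpr ⟨by omega, ?_⟩
        rintro ⟨x, y⟩ hp
        show (pvLcp x.toList y.toList : Int) < mA
        have hrel : x < y := pvZip_tail_rel v hvpw (x, y) hp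
        obtain ⟨h1, h2t⟩ := List.of_mem_zip hp
        have hxu := hvperm.subset h1
        have hyu := hvperm.subset (List.mem_of_mem_tail h2t)
        have hbx := hbound x hxu
        have hby := hbound y hyu
        rw [PySem.Str.len_eq] at hbx hby
        have hne : x.toList ≠ y.toList := fun e => (ne_of_lt hrel) (String.toList_inj.mp e)
        have hlt := pvLcp_lt_of_ne x.toList y.toList hne
        rcases Nat.le_total x.toList.length y.toList.length with hmx | hmx
        · rw [Nat.max_eq_right hmx] at hlt; omega
        · rw [Nat.max_eq_left hmx] at hlt; omega
      have hiff : ∀ L : Int, 1 ≤ L → L ≤ mA - 1 →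
          ((PySem.Set.len (PySem.Set.ofList
              (u.map (fun s => PySem.Str.slice s none (some L)))) = PySem.Set.len u) ↔ best < L) := by
        intro L hL1 _
        have hL0 : (0 : Int) ≤ L := by omega
        have c1 : (PySem.Set.len (PySem.Set.ofList
              (u.map (fun s => PySem.Str.slice s none (some L)))) = PySem.Set.len u)
            ↔ ((PySem.Set.ofList (u.map (fun s => PySem.Str.slice s none (some L)))).length
               = (u.map (fun s => PySem.Str.slice s none (some L))).length) := by
          rw [PySem.Set.len_eq, PySem.Set.len_eq, List.length_map]
          omega
        have c2 := pvLen_ofList_eq_iff (u.map (fun s => PySem.Str.slice s none (some L)))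
        have c3 : (u.map (fun s => PySem.Str.slice s none (some L))).Nodup
            ↔ u.Pairwise (fun a b =>
                PySem.Str.slice a none (some L) ≠ PySem.Str.slice b none (some L)) :=
          List.pairwise_map
        have c4 : u.Pairwise (fun a b =>
              PySem.Str.slice a none (some L) ≠ PySem.Str.slice b none (some L))
            ↔ u.Pairwise (fun a b => pvLcp a.toList b.toList < L.toNat) :=
          pvPairwise_congr_ne hnodup (fun a b hab => pvSlice_ne_iff a b hab L hL0)
        have c5 : u.Pairwise (fun a b => pvLcp a.toList b.toList < L.toNat)
            ↔ v.Pairwise (fun a b => pvLcp a.toList b.toList < L.toNat) :=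
          (List.Perm.pairwise_iff (fun hxy => by rw [pvLcp_comm]; exact hxy) hvperm).symm
        have c6 := pvPairwise_iff_adjacent L.toNat v hvpw
        have c7 : (∀ p ∈ v.zip v.tail, pvLcp p.1.toList p.2.toList < L.toNat) ↔ best < L := by
          rw [hbest_def, pvFold_lt_iff]
          constructor
          · intro hh
            exact ⟨by omega, fun p hp => by have := hh p hp; omega⟩
          · rintro ⟨-, hh⟩ p hp
            have := hh p hp
            omega
        exact c1.trans (c2.trans (c3.trans (c4.trans (c5.trans (c6.trans c7)))))
      have hn1 : best ≤ (((mA - 1).toNat : Nat) : Int) := by omega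
      have hloop := pvLoopA_eq u (PySem.Set.len u) best hbest0 (mA - 1).toNat hn1
        (fun L h1 h2 => hiff L h1 (by omega))
      have hcast : (((mA - 1).toNat : Nat) : Int) = mA - 1 := by omega
      rw [hcast] at hloop
      have hsum : mA - 1 + 1 = mA := by omega
      rw [hsum] at hloop
      rw [hloop, hmBA, min_eq_left (by omega : best + 1 ≤ mA)]

-- ===== VERDICT (by name: the statement is the Claim_ definition above) =====
theorem find_shortest_prefix_length_spec : Claim_equal_find_shortest_prefix_length := by
  intro strings _ hpre
  unfold Spec_find_shortest_prefix_length
  exact pvMain strings hpre
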